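-- pv_equiv track=rewrite | github.com/AntonBjornNilsson/aoc | 2023/14/a.py | eval_load
-- ===== SOURCE A (Python) =====
-- def eval_load(max_val: int, line: list, index: int = 0) -> int:
--     try:
--         stopper = line.index("#")
--     except ValueError:
--         stopper = len(line)
--     count = [max_val - index - x for x in range(line[:stopper].count("O"))]
--     if stopper != len(line) and "O" in line[stopper + 1 :]:
--         return sum(count) + eval_load(
--             max_val, line[stopper + 1 :], index=stopper + index + 1
--         )
--     return sum(count)
-- ===== SOURCE B (Python) =====
-- def eval_load(max_val: int, line: list, index: int = 0) -> int:
--     total = 0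
--     target = index  # global index where the next 'O' in the current segment lands
--     pos = index
--     for c in line:
--         if c == "#":
--             target = pos + 1
--         elif c == "O":
--             total += max_val - target
--             target += 1
--         pos += 1
--     return total
-- ===== Notes on version B (the rewrite author's own statement) =====
-- stated objective: alternative
-- what changed: A recursively re-scans per '#'-segment (list.index, three slices, count, a materialized range list and sum each level); B is one left-to-right loop over the list that tracks the landing position of the next rock and adds each rock's load directly.
import Mathlib
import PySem

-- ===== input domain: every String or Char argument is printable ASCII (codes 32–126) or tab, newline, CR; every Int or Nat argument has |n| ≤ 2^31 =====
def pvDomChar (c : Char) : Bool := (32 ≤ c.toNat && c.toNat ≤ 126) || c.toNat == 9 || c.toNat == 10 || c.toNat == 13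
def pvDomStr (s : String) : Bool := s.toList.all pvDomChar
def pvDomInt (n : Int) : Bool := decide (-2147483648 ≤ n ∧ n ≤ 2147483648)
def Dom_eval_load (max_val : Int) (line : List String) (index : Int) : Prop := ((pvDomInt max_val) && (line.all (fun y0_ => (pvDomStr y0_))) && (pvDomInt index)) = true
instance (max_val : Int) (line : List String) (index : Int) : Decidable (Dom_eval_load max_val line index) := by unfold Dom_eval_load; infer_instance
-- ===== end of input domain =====

-- B replaces A's per-'#'-segment recursion (repeated list.index, slicing, count, range list)
-- by a single left-to-right loop tracking where the next rock lands; same return value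
-- (objective: alternative).

-- ===== PORT A =====
def eval_load (max_val : Int) (line : List String) (index : Int) : Int :=
  -- try: stopper = line.index("#")  except ValueError: stopper = len(line)
  let stopper : Nat := (PySem.List.index? line "#").getD line.length
  -- count = [max_val - index - x for x in range(line[:stopper].count("O"))]
  let count : List Int :=
    (PySem.List.pyRange 0 (PySem.List.count (PySem.List.slice line none (some (stopper : Int))) "O") 1).map
      (fun x => max_val - index - x)
  if _h : stopper ≠ line.length ∧ "O" ∈ PySem.List.slice line (some ((stopper : Int) + 1)) none then
    count.sum + eval_load max_val (PySem.List.slice line (some ((stopper : Int) + 1)) none)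
      ((stopper : Int) + index + 1)
  else
    count.sum
termination_by line.length
decreasing_by
  have hlen : 0 < line.length := by
    have hmem := PySem.List.mem_of_mem_slice line _ _ _h.2
    exact List.length_pos_of_mem hmem
  have hdrop : PySem.List.slice line (some ((((PySem.List.index? line "#").getD line.length) : Int) + 1)) none
      = line.drop ((PySem.List.index? line "#").getD line.length + 1) := by
    have h := PySem.List.slice_from line
      (a := (((PySem.List.index? line "#").getD line.length) : Int) + 1) (by positivity)
    simpa using h
  rw [hdrop, List.length_drop]
  omega

-- ===== PORT B =====
-- loop of Source B: total/target/pos accumulator over the list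
def evalLoadGo (max_val : Int) : Int → Int → Int → List String → Int
  | total, _, _, [] => total
  | total, target, pos, c :: rest =>
    if c = "#" then evalLoadGo max_val total (pos + 1) (pos + 1) rest
    else if c = "O" then evalLoadGo max_val (total + (max_val - target)) (target + 1) (pos + 1) rest
    else evalLoadGo max_val total target (pos + 1) rest

def eval_load_alt (max_val : Int) (line : List String) (index : Int) : Int :=
  evalLoadGo max_val 0 index index line

-- ===== PRECONDITION & SPEC =====
def Spec_eval_load (max_val : Int) (line : List String) (index : Int) (out : Int) : Prop := out = eval_load_alt max_val line index
instance (max_val : Int) (line : List String) (index : Int) (out : Int) : Decidable (Spec_eval_load max_val line index out) := by unfold Spec_eval_load; infer_instance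

-- ===== CLAIM (what is proved, stated in full; the proofs are below) =====
def Claim_equal_eval_load : Prop := ∀ (max_val : Int) (line : List String) (index : Int), Dom_eval_load max_val line index → Spec_eval_load max_val line index (eval_load max_val line index)

-- ===== LEMMAS AND PROOFS =====

-- the load contributed by k rocks landing at positions t, t+1, …, t+k-1
def segSum (max_val t : Int) : Nat → Int
  | 0 => 0
  | k + 1 => (max_val - t) + segSum max_val (t + 1) k

theorem segSum_succ_right (max_val t : Int) (k : Nat) :
    segSum max_val t (k + 1) = segSum max_val t k + (max_val - t - k) := by
  induction k generalizing t with
  | zero => simp [segSum]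
  | succ k ih =>
    rw [segSum, ih (t + 1), segSum]
    push_cast
    ring

-- A's list-comprehension sum is segSum
theorem count_sum_eq_segSum (max_val t : Int) (k : Nat) :
    ((PySem.List.pyRange 0 (k : Int) 1).map (fun x => max_val - t - x)).sum = segSum max_val t k := by
  induction k with
  | zero => simp [PySem.List.pyRange_one_eq_nil, segSum]
  | succ k ih =>
    push_cast
    rw [PySem.List.pyRange_one_succ_right (by positivity), List.map_append, List.sum_append,
      segSum_succ_right]
    simp [ih]

theorem evalLoadGo_add (max_val total target pos : Int) (l : List String) :
    evalLoadGo max_val total target pos l = total + evalLoadGo max_val 0 target pos l := by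
  induction l generalizing total target pos with
  | nil => simp [evalLoadGo]
  | cons c rest ih =>
    simp only [evalLoadGo]
    split_ifs with h1 h2
    · exact ih total (pos + 1) (pos + 1)
    · rw [ih (total + (max_val - target)), ih (0 + (max_val - target))]
      ring
    · exact ih total target (pos + 1)

theorem evalLoadGo_no_O (max_val total target pos : Int) (l : List String) (h : "O" ∉ l) :
    evalLoadGo max_val total target pos l = total := by
  induction l generalizing total target pos with
  | nil => rfl
  | cons c rest ih =>
    simp only [List.mem_cons, not_or] at h
    by_cases h1 : c = "#"
    · simp only [evalLoadGo, if_pos h1]; exact ih _ _ _ h.2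
    · simp only [evalLoadGo, if_neg h1, if_neg (Ne.symm h.1 : ¬ c = "O")]
      exact ih _ _ _ h.2

-- running the loop over a '#'-free prefix
theorem evalLoadGo_seg (max_val : Int) (pre rest : List String) (total target pos : Int)
    (h : "#" ∉ pre) :
    evalLoadGo max_val total target pos (pre ++ rest) =
      evalLoadGo max_val (total + segSum max_val target (pre.count "O"))
        (target + pre.count "O") (pos + pre.length) rest := by
  induction pre generalizing total target pos with
  | nil => simp [segSum]
  | cons c pre' ih =>
    simp only [List.mem_cons, not_or] at h
    simp only [List.cons_append, evalLoadGo, if_neg (fun hc => h.1 (Eq.symm hc))]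
    by_cases h2 : c = "O"
    · rw [if_pos h2, ih _ _ _ h.2]
      subst h2
      congr 1
      · rw [List.count_cons_self, segSum]
        ring
      · rw [List.count_cons_self]
        push_cast
        ring
      · simp
        ring
    · rw [if_neg h2, ih _ _ _ h.2]
      congr 1
      · rw [List.count_cons_of_ne h2]
      · rw [List.count_cons_of_ne h2]
      · simp
        ring

-- decomposition of A's input at the first '#'
theorem first_hash (line : List String) (s : Nat) (h : PySem.List.index? line "#" = some s) :
    s < line.length ∧ line = line.take s ++ "#" :: line.drop (s + 1) ∧ "#" ∉ line.take s := by
  rw [PySem.List.index?_eq_idxOf?, List.idxOf?_eq_some_iff] at h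
  obtain ⟨hs, hget, hprev⟩ := h
  refine ⟨hs, ?_, ?_⟩
  · conv_lhs => rw [← List.take_append_drop s line]
    rw [List.drop_eq_getElem_cons hs, hget]
  · intro hx
    rw [List.mem_take_iff_getElem] at hx
    obtain ⟨j, hj, hje⟩ := hx
    exact hprev j (by omega) hje

-- a single unfolding of A's recursion
theorem eval_load_unfold (max_val : Int) (line : List String) (index : Int) :
    eval_load max_val line index =
      (let stopper : Nat := (PySem.List.index? line "#").getD line.length
       let count : List Int :=
         (PySem.List.pyRange 0 (PySem.List.count (PySem.List.slice line none (some (stopper : Int))) "O") 1).map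
           (fun x => max_val - index - x)
       if stopper ≠ line.length ∧ "O" ∈ PySem.List.slice line (some ((stopper : Int) + 1)) none then
         count.sum + eval_load max_val (PySem.List.slice line (some ((stopper : Int) + 1)) none)
           ((stopper : Int) + index + 1)
       else count.sum) := by
  rw [eval_load]
  rfl

-- main generalized equivalence
theorem eval_load_eq_go (max_val : Int) :
    ∀ (n : Nat) (line : List String), line.length ≤ n → ∀ (index : Int),
      eval_load max_val line index = evalLoadGo max_val 0 index index line := by
  intro n
  induction n with
  | zero =>
    intro line hlen index
    have hnil : line = [] := List.eq_nil_of_length_eq_zero (Nat.le_zero.mp hlen)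
    subst hnil
    rw [eval_load_unfold]
    simp [evalLoadGo, PySem.List.index?, PySem.List.pyRange_one_eq_nil]
  | succ n ih =>
    intro line hlen index
    rw [eval_load_unfold]
    rcases hidx : PySem.List.index? line "#" with _ | s
    · -- no '#': single segment, no recursion
      have hmem : "#" ∉ line := (PySem.List.index?_eq_none_iff line "#").mp hidx
      have hslice : PySem.List.slice line none (some ((line.length : Nat) : Int)) = line := by
        rw [PySem.List.slice_to_natCast]
        exact List.take_length
      simp only [Option.getD_none, ne_eq, not_true_eq_false, false_and, if_false, hslice]
      have hgo := evalLoadGo_seg max_val line [] 0 index index hmem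
      rw [List.append_nil] at hgo
      rw [hgo]
      simp only [evalLoadGo, zero_add]
      exact count_sum_eq_segSum max_val index (PySem.List.count line "O")
    · -- first '#' at position s
      obtain ⟨hs, hdec, hpre⟩ := first_hash line s hidx
      have hslice1 : PySem.List.slice line none (some ((s : Nat) : Int)) = line.take s :=
        PySem.List.slice_to_natCast line s
      have hslice2 : PySem.List.slice line (some (((s : Nat) : Int) + 1)) none = line.drop (s + 1) := by
        have h := PySem.List.slice_from line (a := ((s : Nat) : Int) + 1) (by positivity)
        simpa using h
      have hcount : PySem.List.count (line.take s) "O" = (line.take s).count "O" := rfl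
      have hgo : evalLoadGo max_val 0 index index line =
          segSum max_val index ((line.take s).count "O") +
            evalLoadGo max_val 0 (index + s + 1) (index + s + 1) (line.drop (s + 1)) := by
        conv_lhs => rw [hdec]
        rw [evalLoadGo_seg max_val _ _ 0 index index hpre]
        simp only [evalLoadGo, if_true, zero_add, List.length_take,
          Nat.min_eq_left (le_of_lt hs)]
        rw [evalLoadGo_add]
      simp only [Option.getD_some, hslice1, hslice2, hcount]
      by_cases hO : "O" ∈ line.drop (s + 1)
      · rw [if_pos ⟨by omega, hO⟩, hgo, count_sum_eq_segSum,
          ih (line.drop (s + 1)) (by simp [List.length_drop]; omega) ((s : Int) + index + 1)]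
        have harg : ((s : Int) + index + 1) = index + s + 1 := by ring
        rw [harg]
      · rw [if_neg (by rintro ⟨-, h⟩; exact hO h), hgo, count_sum_eq_segSum,
          evalLoadGo_no_O _ _ _ _ _ hO, add_zero]

-- ===== VERDICT (by name: the statement is the Claim_ definition above) =====
theorem eval_load_spec : Claim_equal_eval_load := by
  intro max_val line index _
  unfold Spec_eval_load eval_load_alt
  exact eval_load_eq_go max_val line.length line (le_refl _) index
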